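-- pv_equiv track=rewrite | github.com/JasonZhengyuZhang/crypto | api-main.py | parseTransaction
-- ===== SOURCE A (Python) =====
-- def parseTransaction(transaction):
--     res = {}
--
--     for item in transaction:
--         try:
--             res['out_addr']=item['prev_out']['addr']
--         except:
--             res['out_addr']=''
--
--     return res
-- ===== SOURCE B (Python) =====
-- def parseTransaction(transaction):
--     res = {}
--     if transaction:
--         item = transaction[-1]
--         try:
--             res['out_addr'] = item['prev_out']['addr']
--         except:
--             res['out_addr'] = ''
--     return res
-- ===== Notes on version B (the rewrite author's own statement) =====
-- stated objective: simpler
-- what changed: The loop only ever keeps the value from the last item, so B drops the loop and reads transaction[-1] directly (empty input yields {}).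
import Mathlib
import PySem

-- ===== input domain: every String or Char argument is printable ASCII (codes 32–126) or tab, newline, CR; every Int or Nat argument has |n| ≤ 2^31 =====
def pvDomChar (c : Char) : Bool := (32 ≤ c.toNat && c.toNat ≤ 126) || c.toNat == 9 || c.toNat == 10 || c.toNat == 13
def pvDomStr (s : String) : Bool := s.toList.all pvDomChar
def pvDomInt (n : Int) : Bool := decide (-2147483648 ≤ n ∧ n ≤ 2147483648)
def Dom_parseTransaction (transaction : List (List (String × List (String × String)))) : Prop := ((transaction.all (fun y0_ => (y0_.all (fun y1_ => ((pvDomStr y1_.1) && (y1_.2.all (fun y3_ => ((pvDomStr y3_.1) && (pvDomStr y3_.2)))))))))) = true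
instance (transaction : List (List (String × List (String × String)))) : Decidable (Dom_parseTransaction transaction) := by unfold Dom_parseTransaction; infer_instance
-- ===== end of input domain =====

-- B drops A's loop: only the last item's value survives, so B reads transaction[-1] directly; same return value, B is simpler.

-- ===== PORT A =====
-- first-match association-list lookup = Python dict lookup (exact: dict d[k], KeyError -> none)
def pyLookup {ν : Type} (d : List (String × ν)) (k : String) : Option ν :=
  match d with
  | [] => none
  | (k', v) :: rest => if k' == k then some v else pyLookup rest k

-- item['prev_out']['addr'] with the bare except: any failure yields ''
def itemAddr (item : List (String × List (String × String))) : String :=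
  match pyLookup item "prev_out" with
  | none => ""
  | some d => (pyLookup d "addr").getD ""

-- res['out_addr'] = v : overwrite in place if present, else append (exact dict-assignment semantics)
def dictSet (d : List (String × String)) (k : String) (v : String) : List (String × String) :=
  match d with
  | [] => [(k, v)]
  | (k', w) :: rest => if k' == k then (k, v) :: rest else (k', w) :: dictSet rest k v

def parseTransaction (transaction : List (List (String × List (String × String)))) : List (String × String) :=
  transaction.foldl (fun res item => dictSet res "out_addr" (itemAddr item)) []

-- ===== PORT B =====
def parseTransaction_alt (transaction : List (List (String × List (String × String)))) : List (String × String) :=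
  match transaction.getLast? with
  | none => []
  | some item => [("out_addr", itemAddr item)]

-- ===== PRECONDITION & SPEC =====
def Spec_parseTransaction (transaction : List (List (String × List (String × String)))) (out : List (String × String)) : Prop := out = parseTransaction_alt transaction
instance (transaction : List (List (String × List (String × String)))) (out : List (String × String)) : Decidable (Spec_parseTransaction transaction out) := by unfold Spec_parseTransaction; infer_instance

-- ===== CLAIM (what is proved, stated in full; the proofs are below) =====
def Claim_equal_parseTransaction : Prop := ∀ (transaction : List (List (String × List (String × String)))), Dom_parseTransaction transaction → Spec_parseTransaction transaction (parseTransaction transaction)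

-- ===== LEMMAS AND PROOFS =====

-- ===== VERDICT (by name: the statement is the Claim_ definition above) =====
theorem foldl_singleton (xs : List (List (String × List (String × String)))) (v : String) :
    xs.foldl (fun res item => dictSet res "out_addr" (itemAddr item)) [("out_addr", v)]
      = [("out_addr", (xs.getLast?.map itemAddr).getD v)] := by
  induction xs generalizing v with
  | nil => rfl
  | cons x xs ih =>
    simp only [List.foldl_cons, dictSet]
    rw [show (("out_addr" == "out_addr") = true) from rfl]
    simp only [if_true, ih]
    cases xs with
    | nil => simp
    | cons y ys =>
      cases h : (y :: ys).getLast? with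
      | none => simp at h
      | some z => simp [h]

theorem parseTransaction_spec : Claim_equal_parseTransaction := by
  intro transaction _
  unfold Spec_parseTransaction parseTransaction parseTransaction_alt
  cases transaction with
  | nil => rfl
  | cons x xs =>
    simp only [List.foldl_cons, dictSet, foldl_singleton]
    cases xs with
    | nil => simp
    | cons y ys =>
      cases h : (y :: ys).getLast? with
      | none => simp at h
      | some z => simp [h]
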